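-- pv_equiv track=rewrite | github.com/donut0310/Problem-Solving-Python- | Programmers/Review/[카카오 3차] n진수 게임.py | notation
-- ===== SOURCE A (Python) =====
-- from collections import deque
--
-- def notation(n,t,m):
--     d = {10:'A',11:'B',12:'C',13:'D',14:'E',15:'F'}
--     s='0'
--     for i in range(t*m):
--         tmp = deque()
--         while i:
--             num = i%n
--             if num<10: tmp.appendleft(str(num))
--             else: tmp.appendleft(str(d[num]))
--             i//=n
--         s+=''.join(tmp)
--     return s
-- ===== SOURCE B (Python) =====
-- def notation(n, t, m):
--     d = {10: 'A', 11: 'B', 12: 'C', 13: 'D', 14: 'E', 15: 'F'}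
--     s = '0'
--     digits = [0]  # current number, least-significant digit first
--     for _ in range(1, t * m):
--         # increment the odometer with carry
--         digits[0] += 1
--         j = 0
--         while digits[j] == n:
--             digits[j] = 0
--             if j + 1 == len(digits):
--                 digits.append(1)
--                 break
--             digits[j + 1] += 1
--             j += 1
--         s += ''.join(str(v) if v < 10 else d[v] for v in reversed(digits))
--     return s
-- ===== Notes on version B (the rewrite author's own statement) =====
-- stated objective: alternative
-- what changed: Instead of re-deriving every number's base-n digits from scratch by repeated division, B maintains the current number as an odometer of base-n digit values that is incremented with carry once per step and rendered after each increment.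
-- outside the precondition, e.g. on notation(-2, 2, 1): A returns '0-1-1', B returns '01'
import Mathlib
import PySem

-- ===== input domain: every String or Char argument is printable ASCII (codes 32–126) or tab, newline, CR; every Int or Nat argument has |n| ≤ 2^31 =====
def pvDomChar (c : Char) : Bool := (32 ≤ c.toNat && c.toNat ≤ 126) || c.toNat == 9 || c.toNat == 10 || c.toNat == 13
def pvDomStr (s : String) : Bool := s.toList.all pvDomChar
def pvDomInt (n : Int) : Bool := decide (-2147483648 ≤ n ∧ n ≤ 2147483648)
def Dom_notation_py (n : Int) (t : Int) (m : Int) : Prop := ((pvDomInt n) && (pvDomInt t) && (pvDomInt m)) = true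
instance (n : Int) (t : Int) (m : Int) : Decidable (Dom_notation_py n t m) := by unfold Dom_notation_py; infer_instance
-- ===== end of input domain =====

-- B replaces A's per-number repeated-division digit extraction by an incremented base-n odometer
-- of digit values, rendered after each carry-propagating increment (objective: alternative).

-- ===== PORT A =====
def notationDict : PySem.Dict Int String :=
  PySem.Dict.ofList [(10, "A"), (11, "B"), (12, "C"), (13, "D"), (14, "E"), (15, "F")]

-- the loop-body conversion: str(num) for num < 10, else d[num] (total form getD; the port is
-- used only under Pre_, where the key is always present)
def digitStrA (num : Int) : String :=
  if num < 10 then PySem.Int.toStr num else notationDict.getD num ""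

-- the inner 'while i:' loop; fuel i.toNat+1 only makes the recursion total (enough for n ≥ 2)
def notationDigitsA (n : Int) : Nat → Int → List String → List String
  | 0, _, tmp => tmp
  | fuel + 1, i, tmp =>
      if i = 0 then tmp
      else
        notationDigitsA n fuel (PySem.Int.floordiv i n)
          (digitStrA (PySem.Int.mod i n) :: tmp)

def notationStepA (n : Int) (s : String) (i : Int) : String :=
  s ++ PySem.Str.join "" (notationDigitsA n (i.toNat + 1) i [])

def notation_py (n : Int) (t : Int) (m : Int) : String :=
  (PySem.List.pyRange 0 (t * m) 1).foldl (notationStepA n) "0"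

-- ===== PORT B =====
def notationDictB : PySem.Dict Int String :=
  PySem.Dict.ofList [(10, "A"), (11, "B"), (12, "C"), (13, "D"), (14, "E"), (15, "F")]

-- the carry 'while' of Source B as structural recursion on the digit list (least-significant first)
def incDigits (n : Int) : List Int → List Int
  | [] => [1]
  | v :: rest => if v + 1 = n then 0 :: incDigits n rest else (v + 1) :: rest

def notationStepB (n : Int) (st : String × List Int) (_i : Int) : String × List Int :=
  let digits := incDigits n st.2
  (st.1 ++ PySem.Str.join ""
      (digits.reverse.map (fun v => if v < 10 then PySem.Int.toStr v else notationDictB.getD v "")),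
   digits)

def notation_py_alt (n : Int) (t : Int) (m : Int) : String :=
  ((PySem.List.pyRange 1 (t * m) 1).foldl (notationStepB n) ("0", [0])).1

-- ===== PRECONDITION & SPEC =====
-- Pre_ restricts to the task's natural domain of bases: n ≥ 2 with every printed value a valid
-- digit (n ≤ 16, or all values single digits below 16), plus the trivial t*m ≤ 1 inputs, where
-- nothing is rendered and any n yields "0". Outside it A raises ZeroDivisionError (n = 0) or
-- KeyError (digit ≥ 16), diverges (n = 1, n = -1), or — for bases ≤ -2, outside any
-- base-conversion task — returns strings with '-' signs embedded inside the digit sequence.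
def Pre_notation_py (n : Int) (t : Int) (m : Int) : Prop :=
  (2 ≤ n ∧ (n ≤ 16 ∨ t * m ≤ 16)) ∨ t * m ≤ 1
instance (n : Int) (t : Int) (m : Int) : Decidable (Pre_notation_py n t m) := by
  unfold Pre_notation_py; infer_instance

def pvWitness_notation_py : Int × Int × Int := (16, 2, 2)

def Spec_notation_py (n : Int) (t : Int) (m : Int) (out : String) : Prop := out = notation_py_alt n t m
instance (n : Int) (t : Int) (m : Int) (out : String) : Decidable (Spec_notation_py n t m out) := by unfold Spec_notation_py; infer_instance

-- ===== CLAIM (what is proved, stated in full; the proofs are below) =====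
def Claim_equal_notation_py : Prop := ∀ (n : Int) (t : Int) (m : Int), Dom_notation_py n t m → Pre_notation_py n t m → Spec_notation_py n t m (notation_py n t m)

-- ===== LEMMAS AND PROOFS =====

-- canonical base-N digits of v, least-significant first (guarded so the recursion is total)
def canon (N : Nat) (v : Nat) : List Int :=
  if _h : v < N ∨ N < 2 then [(v : Int)]
  else (↑(v % N)) :: canon N (v / N)
  termination_by v
  decreasing_by exact Nat.div_lt_self (by omega) (by omega)

lemma canon_zero (N : Nat) (hN : 2 ≤ N) : canon N 0 = [0] := by
  rw [canon, dif_pos (Or.inl (by omega))]; simp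

lemma digitsA_zero (n : Int) (fuel : Nat) (acc : List String) :
    notationDigitsA n fuel 0 acc = acc := by
  cases fuel <;> simp [notationDigitsA]

lemma loopA_eq (n : Int) (hn : 2 ≤ n) :
    ∀ (fuel v : Nat) (acc : List String), 1 ≤ v → v ≤ fuel →
      notationDigitsA n fuel (v : Int) acc
        = ((canon n.toNat v).reverse.map digitStrA) ++ acc := by
  have hN2 : 2 ≤ n.toNat := by omega
  have hNn : ((n.toNat : Nat) : Int) = n := by omega
  have hmod : ∀ v : Nat, PySem.Int.mod (v : Int) n = ((v % n.toNat : Nat) : Int) := by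
    intro v; rw [← hNn]; exact PySem.Int.mod_natCast v n.toNat
  have hdiv : ∀ v : Nat, PySem.Int.floordiv (v : Int) n = ((v / n.toNat : Nat) : Int) := by
    intro v; rw [← hNn]; exact PySem.Int.floordiv_natCast v n.toNat
  intro fuel
  induction fuel with
  | zero => intro v acc hv hf; omega
  | succ f ih =>
      intro v acc hv hf
      rw [notationDigitsA, if_neg (by exact_mod_cast (by omega : ¬ (v : Int) = 0))]
      rw [hmod, hdiv]
      by_cases hvN : v < n.toNat
      · have h0 : v / n.toNat = 0 := Nat.div_eq_of_lt hvN
        have hm : v % n.toNat = v := Nat.mod_eq_of_lt hvN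
        rw [h0, hm]
        rw [show ((0 : Nat) : Int) = 0 from rfl, digitsA_zero]
        rw [canon, dif_pos (Or.inl hvN)]
        simp
      · have hq1 : 1 ≤ v / n.toNat := (Nat.one_le_div_iff (by omega)).mpr (by omega)
        have hqlt : v / n.toNat < v := Nat.div_lt_self (by omega) (by omega)
        rw [ih (v / n.toNat) _ hq1 (by omega)]
        have hC : canon n.toNat v
            = (↑(v % n.toNat)) :: canon n.toNat (v / n.toNat) := by
          rw [canon, dif_neg (by omega)]
        rw [hC]
        simp [List.map_append, List.append_assoc]

lemma inc_canon (n : Int) (hn : 2 ≤ n) :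
    ∀ v : Nat, incDigits n (canon n.toNat v) = canon n.toNat (v + 1) := by
  have hN2 : 2 ≤ n.toNat := by omega
  have hNn : ((n.toNat : Nat) : Int) = n := by omega
  intro v
  induction v using Nat.strong_induction_on with
  | _ v ih =>
    by_cases h1 : v + 1 < n.toNat
    · rw [canon, dif_pos (Or.inl (by omega)), canon, dif_pos (Or.inl h1)]
      simp only [incDigits]
      rw [if_neg (by omega)]
      simp
    · by_cases h2 : v + 1 = n.toNat
      · rw [canon, dif_pos (Or.inl (by omega))]
        simp only [incDigits]
        rw [if_pos (by omega)]
        have hRHS : canon n.toNat (v + 1) = (0 : Int) :: canon n.toNat 1 := by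
          rw [h2, canon, dif_neg (by omega), Nat.mod_self, Nat.div_self (by omega)]
          simp
        rw [hRHS, canon, dif_pos (Or.inl (by omega))]
        simp
      · -- v ≥ N: canon v = r :: canon q with r = v % N, q = v / N
        have hvN : n.toNat ≤ v := by omega
        have hr : v % n.toNat < n.toNat := Nat.mod_lt _ (by omega)
        have hdm : n.toNat * (v / n.toNat) + v % n.toNat = v := Nat.div_add_mod v n.toNat
        have hqlt : v / n.toNat < v := Nat.div_lt_self (by omega) (by omega)
        have hC : canon n.toNat v
            = (↑(v % n.toNat)) :: canon n.toNat (v / n.toNat) := by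
          rw [canon, dif_neg (by omega)]
        rw [hC]
        simp only [incDigits]
        by_cases hr1 : v % n.toNat + 1 = n.toNat
        · rw [if_pos (by omega), ih _ hqlt]
          have hv1 : v + 1 = n.toNat * (v / n.toNat + 1) := by
            rw [Nat.mul_add, Nat.mul_one]; omega
          have hge : n.toNat ≤ n.toNat * (v / n.toNat + 1) :=
            Nat.le_mul_of_pos_right n.toNat (Nat.succ_pos _)
          have hRHS : canon n.toNat (v + 1)
              = (0 : Int) :: canon n.toNat (v / n.toNat + 1) := by
            rw [hv1, canon, dif_neg (by omega), Nat.mul_mod_right,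
              Nat.mul_div_cancel_left _ (show 0 < n.toNat by omega)]
            simp
          rw [hRHS]
        · have hv1 : v + 1 = (v % n.toNat + 1) + n.toNat * (v / n.toNat) := by omega
          have hmod : (v + 1) % n.toNat = v % n.toNat + 1 := by
            rw [hv1, Nat.add_mul_mod_self_left, Nat.mod_eq_of_lt (by omega)]
          have hdiv : (v + 1) / n.toNat = v / n.toNat := by
            rw [hv1, Nat.add_mul_div_left _ _ (show 0 < n.toNat by omega),
              Nat.div_eq_of_lt (by omega)]
            omega
          rw [if_neg (by omega)]
          have hRHS : canon n.toNat (v + 1)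
              = (↑(v % n.toNat + 1)) :: canon n.toNat (v / n.toNat) := by
            rw [canon, dif_neg (by omega), hmod, hdiv]
          rw [hRHS]
          simp

lemma fold_eq (n : Int) (hn : 2 ≤ n) :
    ∀ k : Nat, 1 ≤ k →
      ((PySem.List.pyRange 1 (k : Int) 1).foldl (notationStepB n) ("0", [0])).2
          = canon n.toNat (k - 1)
        ∧ (PySem.List.pyRange 0 (k : Int) 1).foldl (notationStepA n) "0"
          = ((PySem.List.pyRange 1 (k : Int) 1).foldl (notationStepB n) ("0", [0])).1 := by
  have hch : (fun v : Int => if v < 10 then PySem.Int.toStr v else notationDictB.getD v "")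
      = digitStrA := rfl
  intro k
  induction k with
  | zero => intro h; omega
  | succ k ih =>
      intro _
      by_cases hk0 : k = 0
      · subst hk0
        have e1 : ((0 + 1 : Nat) : Int) = 1 := by norm_num
        rw [e1]
        rw [show PySem.List.pyRange 1 (1 : Int) 1 = [] from by decide,
          show PySem.List.pyRange 0 (1 : Int) 1 = [0] from by decide]
        constructor
        · simp [canon_zero n.toNat (by omega)]
        · simp only [List.foldl_cons, List.foldl_nil, notationStepA]
          rw [digitsA_zero]
          decide
      · have hk1 : 1 ≤ k := by omega
        obtain ⟨ihB, ihA⟩ := ih hk1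
        have hcast : ((k + 1 : Nat) : Int) = (k : Int) + 1 := by push_cast; ring
        rw [hcast,
          PySem.List.pyRange_one_succ_right (show (0:Int) ≤ k by positivity),
          PySem.List.pyRange_one_succ_right (show (1:Int) ≤ k by exact_mod_cast hk1),
          List.foldl_append, List.foldl_append]
        simp only [List.foldl_cons, List.foldl_nil]
        rw [ihA]
        set pr := (PySem.List.pyRange 1 (k : Int) 1).foldl (notationStepB n) ("0", [0])
        have hinc : incDigits n pr.2 = canon n.toNat k := by
          rw [ihB, inc_canon n hn, Nat.sub_add_cancel hk1]
        constructor
        · simp only [notationStepB, hinc, Nat.add_sub_cancel]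
        · simp only [notationStepA, notationStepB, hinc, hch]
          rw [show ((k : Int)).toNat = k from Int.toNat_natCast k]
          rw [loopA_eq n hn (k + 1) k [] hk1 (by omega)]
          simp

-- ===== VERDICT (by name: the statement is the Claim_ definition above) =====
theorem notation_py_spec : Claim_equal_notation_py := by
  intro n t m _hdom hpre
  unfold Spec_notation_py notation_py notation_py_alt
  by_cases hK : t * m ≤ 0
  · rw [PySem.List.pyRange_one_eq_nil hK, PySem.List.pyRange_one_eq_nil (by omega)]
    rfl
  · by_cases hK1 : t * m = 1
    · rw [hK1]
      rw [show PySem.List.pyRange 0 (1 : Int) 1 = [0] from by decide,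
        show PySem.List.pyRange 1 (1 : Int) 1 = [] from by decide]
      simp only [List.foldl_cons, List.foldl_nil, notationStepA]
      rw [digitsA_zero]
      decide
    · have hn : 2 ≤ n := by
        rcases hpre with ⟨hn, _⟩ | htm1
        · exact hn
        · omega
      have h1 : (1 : Int) ≤ t * m := by omega
      have hk : ((t * m).toNat : Int) = t * m := Int.toNat_of_nonneg (by omega)
      have hk1 : 1 ≤ (t * m).toNat := by omega
      obtain ⟨_, h⟩ := fold_eq n hn (t * m).toNat hk1
      rw [← hk]
      exact h
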